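-- pv_equiv track=rewrite | github.com/zzammz/MKcode | 1-Snippets/1-Basics/Python/basics.py | sub_if_pwd_valid
-- ===== SOURCE A (Python) =====
-- def sub_if_pwd_valid(param_sub_str):
--     count_alpha = 0
--     count_num = 0
--
--     for cctr in range (0, len(param_sub_str)):
--         if param_sub_str[cctr].isalpha():
--             count_alpha += 1
--         elif param_sub_str[cctr].isdigit():
--             count_num += 1
--         else:
--             return -1
--
--     if count_alpha > 0 and count_num > 0:
--         if count_alpha % 2 == 0 and count_num %2 != 0:
--             return count_alpha + count_num
--
--     return -1
-- ===== SOURCE B (Python) =====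
-- def sub_if_pwd_valid(param_sub_str):
--     ca = sum(1 for c in param_sub_str if c.isalpha())
--     cn = sum(1 for c in param_sub_str if c.isdigit())
--     if ca + cn != len(param_sub_str):
--         return -1
--     if ca > 0 and cn > 0 and ca % 2 == 0 and cn % 2 != 0:
--         return ca + cn
--     return -1
-- ===== Notes on version B (the rewrite author's own statement) =====
-- stated objective: alternative
-- what changed: Replaces the early-returning index loop with an aggregate formulation: count alpha and digit characters in whole-string passes, detect foreign characters by ca+cn != len(s) (alpha and digit are disjoint), then apply the parity/positivity test.
import Mathlib
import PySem

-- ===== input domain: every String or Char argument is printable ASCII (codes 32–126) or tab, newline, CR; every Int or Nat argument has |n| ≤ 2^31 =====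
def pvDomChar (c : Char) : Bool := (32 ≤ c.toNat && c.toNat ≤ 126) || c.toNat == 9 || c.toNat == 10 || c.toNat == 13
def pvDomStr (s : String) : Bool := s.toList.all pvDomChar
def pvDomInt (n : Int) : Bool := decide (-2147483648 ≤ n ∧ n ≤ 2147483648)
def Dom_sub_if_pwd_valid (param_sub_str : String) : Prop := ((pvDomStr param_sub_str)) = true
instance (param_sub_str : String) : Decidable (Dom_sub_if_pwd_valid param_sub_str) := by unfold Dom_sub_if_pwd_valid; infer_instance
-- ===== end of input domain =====

-- B replaces A's early-returning index loop with whole-string counting passes plus a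
-- length check for foreign characters; same cost, different decomposition (objective: alternative).

-- ===== PORT A =====
-- the final check after A's loop
def pvFinalA (ca cn : Int) : Int :=
  if ca > 0 ∧ cn > 0 then
    (if ca % 2 = 0 ∧ cn % 2 ≠ 0 then ca + cn else -1)
  else -1

-- A's for-loop over the characters, with the early 'return -1'
def pvLoopA : List Char → Int → Int → Int
  | [], ca, cn => pvFinalA ca cn
  | c :: rest, ca, cn =>
      if PySem.Chars.isalpha c then pvLoopA rest (ca + 1) cn
      else if PySem.Chars.isdigit c then pvLoopA rest ca (cn + 1)
      else -1

def sub_if_pwd_valid (param_sub_str : String) : Int :=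
  pvLoopA param_sub_str.toList 0 0

-- ===== PORT B =====
def sub_if_pwd_valid_alt (param_sub_str : String) : Int :=
  let l := param_sub_str.toList
  let ca : Int := (l.countP PySem.Chars.isalpha : Nat)
  let cn : Int := (l.countP PySem.Chars.isdigit : Nat)
  if ca + cn ≠ (l.length : Int) then -1
  else if ca > 0 ∧ cn > 0 ∧ ca % 2 = 0 ∧ cn % 2 ≠ 0 then ca + cn
  else -1

-- ===== PRECONDITION & SPEC =====
def Spec_sub_if_pwd_valid (param_sub_str : String) (out : Int) : Prop := out = sub_if_pwd_valid_alt param_sub_str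
instance (param_sub_str : String) (out : Int) : Decidable (Spec_sub_if_pwd_valid param_sub_str out) := by unfold Spec_sub_if_pwd_valid; infer_instance

-- ===== CLAIM (what is proved, stated in full; the proofs are below) =====
def Claim_equal_sub_if_pwd_valid : Prop := ∀ (param_sub_str : String), Dom_sub_if_pwd_valid param_sub_str → Spec_sub_if_pwd_valid param_sub_str (sub_if_pwd_valid param_sub_str)

-- ===== LEMMAS AND PROOFS =====

-- alpha and digit characters are disjoint
theorem pv_alpha_digit_disjoint (c : Char) (h : PySem.Chars.isalpha c = true) :
    PySem.Chars.isdigit c = false := by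
  by_contra hd
  simp only [Bool.not_eq_false] at hd
  revert h hd
  simp [PySem.Chars.isalpha, PySem.Chars.isdigit, PySem.Chars.isupper, PySem.Chars.islower,
        Char.le_def, UInt32.le_iff_toNat_le]
  omega

def pvOk (c : Char) : Bool := PySem.Chars.isalpha c || PySem.Chars.isdigit c

-- characterisation of A's loop
theorem pvFinalA_flat (ca cn : Int) :
    pvFinalA ca cn = if ca > 0 ∧ cn > 0 ∧ ca % 2 = 0 ∧ cn % 2 ≠ 0 then ca + cn else -1 := by
  unfold pvFinalA; split_ifs <;> tauto

-- characterisation of A's loop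
theorem pvLoopA_eq (l : List Char) (ca cn : Int) :
    pvLoopA l ca cn =
      if l.all pvOk then
        pvFinalA (ca + (l.countP PySem.Chars.isalpha : Nat)) (cn + (l.countP PySem.Chars.isdigit : Nat))
      else -1 := by
  induction l generalizing ca cn with
  | nil => simp [pvLoopA]
  | cons c rest ih =>
      by_cases ha : PySem.Chars.isalpha c = true
      · have hd := pv_alpha_digit_disjoint c ha
        simp [pvLoopA, ha, hd, ih, pvOk, List.countP_cons]
        split_ifs
        · congr 1 <;> push_cast <;> ring
        · rfl
      · by_cases hd : PySem.Chars.isdigit c = true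
        · simp [pvLoopA, ha, hd, ih, pvOk, List.countP_cons]
          split_ifs
          · congr 1 <;> push_cast <;> ring
          · rfl
        · simp [pvLoopA, ha, hd, pvOk]

theorem pv_count_sum (l : List Char) :
    l.countP PySem.Chars.isalpha + l.countP PySem.Chars.isdigit = l.countP pvOk := by
  induction l with
  | nil => simp
  | cons c rest ih =>
      by_cases ha : PySem.Chars.isalpha c = true
      · have hd := pv_alpha_digit_disjoint c ha
        simp [List.countP_cons, ha, hd, pvOk]; omega
      · by_cases hd : PySem.Chars.isdigit c = true <;>
          simp [List.countP_cons, ha, hd, pvOk] <;> omega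

-- ===== VERDICT (by name: the statement is the Claim_ definition above) =====
theorem sub_if_pwd_valid_spec : Claim_equal_sub_if_pwd_valid := by
  intro s _
  unfold Spec_sub_if_pwd_valid sub_if_pwd_valid sub_if_pwd_valid_alt
  rw [pvLoopA_eq]
  set l := s.toList
  have hsum := pv_count_sum l
  by_cases hall : l.all pvOk = true
  · have hlen : l.countP pvOk = l.length := by
      rw [List.countP_eq_length]
      intro a ha; exact (List.all_eq_true.mp hall) a ha
    have heq : ((l.countP PySem.Chars.isalpha : Nat) : Int) + (l.countP PySem.Chars.isdigit : Nat) = (l.length : Int) := by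
      push_cast; omega
    simp only [hall, if_true, heq, ne_eq, not_true_eq_false, if_false, pvFinalA_flat]
    simp only [zero_add]
    rw [heq]
  · have hle : l.countP pvOk ≤ l.length := List.countP_le_length
    have hne : l.countP pvOk ≠ l.length := by
      intro h
      exact hall (List.all_eq_true.mpr (List.countP_eq_length.mp h))
    have hlt : l.countP pvOk < l.length := lt_of_le_of_ne hle hne
    have : ((l.countP PySem.Chars.isalpha : Nat) : Int) + (l.countP PySem.Chars.isdigit : Nat) ≠ (l.length : Int) := by
      push_cast; omega
    simp [hall, this]
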